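-- pv_equiv track=rewrite | github.com/Shiraishi-Shodai/Deep-Learning2-2 | common/util.py | custom_preprocess
-- ===== SOURCE A (Python) =====
-- def custom_preprocess(text_np):
--     """各要素にテキストが入ったnumpy配列を受け取り、以下の値を返す
--     return1: corpus 各要素の単語ID
--     return2: word_to_id その単語のid
--     return3: id_to_word その単語
--     """
--     corpus = []
--     word_to_id = {}
--     id_to_word = {}
--
--     for text in text_np:
--         if text not in word_to_id:
--             new_id = len(id_to_word)
--             word_to_id[text] = new_id
--             id_to_word[new_id] = text
--         corpus.append(word_to_id[text])
--
--     return corpus, word_to_id, id_to_word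
-- ===== SOURCE B (Python) =====
-- def custom_preprocess(text_np):
--     """Dedup-then-derive variant: extract the distinct words first (first-appearance
--     order), derive both mappings from the enumerated vocabulary, then encode."""
--     vocab = list(dict.fromkeys(text_np))          # distinct words, first-appearance order
--     word_to_id = {w: i for i, w in enumerate(vocab)}
--     id_to_word = dict(enumerate(vocab))
--     corpus = [word_to_id[w] for w in text_np]
--     return corpus, word_to_id, id_to_word
-- ===== Notes on version B (the rewrite author's own statement) =====
-- stated objective: alternative
-- what changed: A grows two dicts in lockstep inside one loop, assigning each fresh id from the current dict size; B never assigns ids in a loop at all: it dedups the text into a vocabulary list, derives word_to_id and id_to_word from enumerate(vocab), and encodes the text through the finished index.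
import Mathlib
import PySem

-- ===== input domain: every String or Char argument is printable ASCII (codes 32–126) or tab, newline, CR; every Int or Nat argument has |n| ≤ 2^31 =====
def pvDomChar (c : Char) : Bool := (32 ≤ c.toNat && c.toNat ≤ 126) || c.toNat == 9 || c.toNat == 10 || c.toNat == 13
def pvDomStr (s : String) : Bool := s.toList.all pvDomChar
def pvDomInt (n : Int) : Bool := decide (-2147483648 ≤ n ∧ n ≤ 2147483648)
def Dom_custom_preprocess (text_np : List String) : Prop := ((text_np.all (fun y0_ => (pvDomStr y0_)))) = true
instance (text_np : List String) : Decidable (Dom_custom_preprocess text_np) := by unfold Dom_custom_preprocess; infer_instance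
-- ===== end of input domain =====

-- A grows the two dicts in lockstep inside one loop (fresh id = current dict size); B dedups the
-- text into a vocabulary list, derives both dicts from enumerate(vocab), then encodes. No speed claim.

-- ===== PORT A =====
-- one loop body: possibly assign a fresh id (len(id_to_word)), then append word_to_id[text]
-- (the lookup word_to_id[text] cannot raise: the key was just ensured, so getD is exact here)
def cpStepA (st : List Int × PySem.Dict String Int × PySem.Dict Int String) (text : String) :
    List Int × PySem.Dict String Int × PySem.Dict Int String :=
  let corpus := st.1
  let word_to_id := st.2.1
  let id_to_word := st.2.2
  let (word_to_id, id_to_word) :=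
    if word_to_id.contains text then (word_to_id, id_to_word)
    else
      let new_id : Int := id_to_word.size
      (word_to_id.insert text new_id, id_to_word.insert new_id text)
  (corpus ++ [word_to_id.getD text 0], word_to_id, id_to_word)

def custom_preprocess (text_np : List String) : List Int × (List (String × Int)) × (List (Int × String)) :=
  let st := text_np.foldl cpStepA ([], PySem.Dict.empty, PySem.Dict.empty)
  (st.1, st.2.1.items, st.2.2.items)

-- ===== PORT B =====
-- word_to_id = {w: i for i, w in enumerate(vocab)}
def cpW2I (vocab : List String) : PySem.Dict String Int :=
  (PySem.List.enumerate vocab).foldl (fun d p => d.insert p.2 p.1) PySem.Dict.empty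

-- id_to_word = dict(enumerate(vocab))
def cpI2W (vocab : List String) : PySem.Dict Int String :=
  (PySem.List.enumerate vocab).foldl (fun d p => d.insert p.1 p.2) PySem.Dict.empty

def custom_preprocess_alt (text_np : List String) : List Int × (List (String × Int)) × (List (Int × String)) :=
  let vocab := PySem.List.dedup text_np            -- list(dict.fromkeys(text_np))
  let word_to_id := cpW2I vocab
  let id_to_word := cpI2W vocab
  -- corpus = [word_to_id[w] for w in text_np] (key always present, so getD is exact)
  (text_np.map (fun w => word_to_id.getD w 0), word_to_id.items, id_to_word.items)

-- ===== PRECONDITION & SPEC =====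
def Spec_custom_preprocess (text_np : List String) (out : List Int × (List (String × Int)) × (List (Int × String))) : Prop := out = custom_preprocess_alt text_np
instance (text_np : List String) (out : List Int × (List (String × Int)) × (List (Int × String))) : Decidable (Spec_custom_preprocess text_np out) := by unfold Spec_custom_preprocess; infer_instance

-- ===== CLAIM (what is proved, stated in full; the proofs are below) =====
def Claim_equal_custom_preprocess : Prop := ∀ (text_np : List String), Dom_custom_preprocess text_np → Spec_custom_preprocess text_np (custom_preprocess text_np)

-- ===== LEMMAS AND PROOFS =====

-- proof-side description of A's loop as vocabulary growth (used only by the lemmas below)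
def cpVStep (st : PySem.Dict String Int × PySem.Dict Int String) (w : String) :
    PySem.Dict String Int × PySem.Dict Int String :=
  if st.1.contains w then st
  else
    let nid : Int := st.1.size
    (st.1.insert w nid, st.2.insert nid w)

-- invariant of the two-dict state: sizes agree and every id key is below the size
def cpInv (w2i : PySem.Dict String Int) (i2w : PySem.Dict Int String) : Prop :=
  w2i.size = i2w.size ∧ ∀ k ∈ i2w.keys, 0 ≤ k ∧ k < (i2w.size : Int)

lemma cpInv_step (w2i : PySem.Dict String Int) (i2w : PySem.Dict Int String) (w : String)
    (h : cpInv w2i i2w) : cpInv (cpVStep (w2i, i2w) w).1 (cpVStep (w2i, i2w) w).2 := by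
  obtain ⟨hsz, hk⟩ := h
  unfold cpVStep
  by_cases hc : w2i.contains w
  · simp [hc]; exact ⟨hsz, hk⟩
  · have hfresh : i2w.contains (w2i.size : Int) = false := by
      by_contra hmem
      have : (w2i.size : Int) ∈ i2w.keys :=
        (PySem.Dict.contains_iff_mem_keys i2w _).mp (by simpa using hmem)
      have := (hk _ this).2
      omega
    simp only [hc, Bool.false_eq_true, if_false]
    refine ⟨?_, ?_⟩
    · rw [PySem.Dict.size_insert, PySem.Dict.size_insert, if_neg (by simp [hc]),
        if_neg (by simp [hfresh])]
      omega
    · intro k hkmem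
      simp only [PySem.Dict.size_insert, hfresh, Bool.false_eq_true, if_false]
      rcases (PySem.Dict.mem_keys_insert _ _ _ _).mp hkmem with hkeq | hkin
      · subst hkeq; constructor
        · positivity
        · push_cast; omega
      · have := hk _ hkin; push_cast; omega

-- the vocabulary fold never changes the id of a word already present
lemma cpVFold_getD_stable (ts : List String) (w2i : PySem.Dict String Int)
    (i2w : PySem.Dict Int String) (w : String) (h : w2i.contains w = true) :
    (ts.foldl cpVStep (w2i, i2w)).1.getD w 0 = w2i.getD w 0 := by
  induction ts generalizing w2i i2w with
  | nil => rfl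
  | cons t ts ih =>
    simp only [List.foldl_cons]
    by_cases hc : w2i.contains t
    · have hV : cpVStep (w2i, i2w) t = (w2i, i2w) := by simp [cpVStep, hc]
      rw [hV]; exact ih w2i i2w h
    · have hV : cpVStep (w2i, i2w) t =
          (w2i.insert t (w2i.size : Int), i2w.insert (w2i.size : Int) t) := by
        simp [cpVStep, hc]
      rw [hV, ih _ _ (by simp [PySem.Dict.contains_insert, h])]
      exact PySem.Dict.getD_insert_of_ne w2i _ _ (by rintro rfl; rw [h] at hc; exact hc rfl)

-- the word just processed is present afterwards
lemma cpVStep_contains (w2i : PySem.Dict String Int) (i2w : PySem.Dict Int String) (w : String) :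
    (cpVStep (w2i, i2w) w).1.contains w = true := by
  unfold cpVStep
  by_cases hc : w2i.contains w
  · simp [hc]
  · simp [hc]

-- A's interleaved fold = prefix corpus ++ mapping through the final vocabulary dicts
lemma cpLoop_eq (ts : List String) (corpus : List Int) (w2i : PySem.Dict String Int)
    (i2w : PySem.Dict Int String) (h : cpInv w2i i2w) :
    ts.foldl cpStepA (corpus, w2i, i2w) =
      (corpus ++ ts.map (fun w => (ts.foldl cpVStep (w2i, i2w)).1.getD w 0),
        (ts.foldl cpVStep (w2i, i2w)).1, (ts.foldl cpVStep (w2i, i2w)).2) := by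
  induction ts generalizing corpus w2i i2w with
  | nil => simp
  | cons t ts ih =>
    have hstep := cpInv_step w2i i2w t h
    have hpres := cpVStep_contains w2i i2w t
    have hstable := cpVFold_getD_stable ts (cpVStep (w2i, i2w) t).1 (cpVStep (w2i, i2w) t).2 t hpres
    simp only [List.foldl_cons, List.map_cons]
    by_cases hc : w2i.contains t
    · have hA : cpStepA (corpus, w2i, i2w) t = (corpus ++ [w2i.getD t 0], w2i, i2w) := by
        unfold cpStepA; simp [hc]
      have hV : cpVStep (w2i, i2w) t = (w2i, i2w) := by unfold cpVStep; simp [hc]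
      rw [hA, hV, ih _ _ _ h]
      rw [hV] at hstable
      simp [hstable]
    · have hA : cpStepA (corpus, w2i, i2w) t =
          (corpus ++ [(w2i.insert t (i2w.size : Int)).getD t 0],
            w2i.insert t (i2w.size : Int), i2w.insert (i2w.size : Int) t) := by
        unfold cpStepA; simp [hc]
      have hV : cpVStep (w2i, i2w) t =
          (w2i.insert t (w2i.size : Int), i2w.insert (w2i.size : Int) t) := by
        unfold cpVStep; simp [hc]
      have hsz : (w2i.size : Int) = (i2w.size : Int) := by rw [h.1]
      rw [hA, ← hsz]
      rw [hV] at hstep hstable ⊢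
      rw [ih _ _ _ hstep]
      simp [hstable, PySem.Dict.getD_insert_self]

-- ===== bridge: the vocabulary fold is exactly B's enumerate-derived dicts over the dedup list =====

lemma cpW2I_items (vs : List String) (h : vs.Nodup) :
    (cpW2I vs).items = (PySem.List.enumerate vs).map (fun p => (p.2, p.1)) := by
  have := PySem.Dict.items_foldl_insert_fresh (l := PySem.List.enumerate vs)
    (k := fun p : Int × String => p.2) (v := fun p : Int × String => p.1)
    (d := PySem.Dict.empty)
    (by intro a _; simp [PySem.Dict.contains_empty])
    (by rw [PySem.List.map_snd_enumerate]; exact h)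
  unfold cpW2I
  simpa using this

lemma cpW2I_size (vs : List String) (h : vs.Nodup) : (cpW2I vs).size = vs.length := by
  have : (cpW2I vs).size = (cpW2I vs).items.length := rfl
  rw [this, cpW2I_items vs h, List.length_map, PySem.List.length_enumerate]

lemma cpW2I_contains (vs : List String) (w : String) :
    (cpW2I vs).contains w = true ↔ w ∈ vs := by
  rw [PySem.Dict.contains_iff_mem_keys]
  unfold cpW2I
  rw [PySem.Dict.keys_foldl_insert_key]
  rw [PySem.Set.mem_update]
  simp [PySem.Dict.keys_empty, PySem.List.map_snd_enumerate]

lemma cpW2I_append (vs : List String) (t : String) :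
    cpW2I (vs ++ [t]) = (cpW2I vs).insert t (vs.length : Int) := by
  unfold cpW2I
  rw [PySem.List.enumerate_append, List.foldl_append]
  simp [PySem.List.enumerate_cons, PySem.List.enumerate_nil]

lemma cpI2W_append (vs : List String) (t : String) :
    cpI2W (vs ++ [t]) = (cpI2W vs).insert (vs.length : Int) t := by
  unfold cpI2W
  rw [PySem.List.enumerate_append, List.foldl_append]
  simp [PySem.List.enumerate_cons, PySem.List.enumerate_nil]

lemma cpVFold_eq (ts vs : List String) (h : vs.Nodup) :
    ts.foldl cpVStep (cpW2I vs, cpI2W vs) =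
      (cpW2I (PySem.Set.update vs ts), cpI2W (PySem.Set.update vs ts)) := by
  induction ts generalizing vs with
  | nil => simp [PySem.Set.update_nil]
  | cons t ts ih =>
    rw [List.foldl_cons, PySem.Set.update_cons]
    by_cases hm : t ∈ vs
    · have hc : (cpW2I vs).contains t = true := (cpW2I_contains vs t).mpr hm
      have hV : cpVStep (cpW2I vs, cpI2W vs) t = (cpW2I vs, cpI2W vs) := by
        simp [cpVStep, hc]
      rw [hV, PySem.Set.add_of_mem hm]
      exact ih vs h
    · have hc : (cpW2I vs).contains t = false := by
        by_contra hcc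
        exact hm ((cpW2I_contains vs t).mp (by simpa using hcc))
      have hV : cpVStep (cpW2I vs, cpI2W vs) t =
          (cpW2I (vs ++ [t]), cpI2W (vs ++ [t])) := by
        rw [cpW2I_append, cpI2W_append, ← cpW2I_size vs h]
        simp [cpVStep, hc]
      rw [hV, PySem.Set.add_of_not_mem hm]
      exact ih (vs ++ [t])
        (by simp [List.nodup_append, h]; exact fun a ha hat => hm (hat ▸ ha))

-- ===== VERDICT (by name: the statement is the Claim_ definition above) =====
theorem custom_preprocess_spec : Claim_equal_custom_preprocess := by
  intro text_np _
  unfold Spec_custom_preprocess custom_preprocess custom_preprocess_alt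
  rw [cpLoop_eq text_np [] PySem.Dict.empty PySem.Dict.empty
    ⟨by simp, by simp [PySem.Dict.keys_empty]⟩]
  have h0 : (PySem.Dict.empty, PySem.Dict.empty) = (cpW2I [], cpI2W []) := rfl
  have hupd : PySem.Set.update ([] : List String) text_np = PySem.List.dedup text_np := by
    rw [PySem.List.dedup_eq_ofList, PySem.Set.ofList_eq_foldl]; rfl
  rw [h0, cpVFold_eq text_np [] List.nodup_nil, hupd]
  simp
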